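-- pv_equiv track=rewrite | github.com/hauteuar/research_agent | streamit_app.py | extract_component_name
-- ===== SOURCE A (Python) =====
-- def extract_component_name(query: str) -> str:
--     """Extract component name from natural language query"""
--     # Simple extraction - could be enhanced with NLP
--     words = query.split()
--
--     # Look for patterns like "analyze COMPONENT_NAME" or "trace FIELD_NAME"
--     trigger_words = ['analyze', 'trace', 'lifecycle', 'lineage', 'impact', 'of', 'for']
--
--     for i, word in enumerate(words):
--         if word.lower() in trigger_words and i + 1 < len(words):
--             potential_component = words[i + 1].strip('.,!?')
--             if len(potential_component) > 2:  # Basic validation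
--                 return potential_component
--
--     # Look for uppercase words (likely component names)
--     for word in words:
--         if word.isupper() and len(word) > 2:
--             return word
--
--     return ""
-- ===== SOURCE B (Python) =====
-- def extract_component_name(query: str) -> str:
--     """Extract component name from natural language query (single pass)."""
--     words = query.split()
--     triggers = {'analyze', 'trace', 'lifecycle', 'lineage', 'impact', 'of', 'for'}
--     upper_cand = None
--     for i, word in enumerate(words):
--         if word.lower() in triggers and i + 1 < len(words):
--             pc = words[i + 1].strip('.,!?')
--             if len(pc) > 2:
--                 return pc
--         if upper_cand is None and word.isupper() and len(word) > 2:
--             upper_cand = word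
--     return upper_cand if upper_cand is not None else ""
-- ===== Notes on version B (the rewrite author's own statement) =====
-- stated objective: alternative
-- what changed: A's two sequential scans (trigger scan, then uppercase scan) are merged into a single stateful pass over the enumerated words that returns early on a trigger match and remembers the first uppercase candidate for the fallback.
import Mathlib
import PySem

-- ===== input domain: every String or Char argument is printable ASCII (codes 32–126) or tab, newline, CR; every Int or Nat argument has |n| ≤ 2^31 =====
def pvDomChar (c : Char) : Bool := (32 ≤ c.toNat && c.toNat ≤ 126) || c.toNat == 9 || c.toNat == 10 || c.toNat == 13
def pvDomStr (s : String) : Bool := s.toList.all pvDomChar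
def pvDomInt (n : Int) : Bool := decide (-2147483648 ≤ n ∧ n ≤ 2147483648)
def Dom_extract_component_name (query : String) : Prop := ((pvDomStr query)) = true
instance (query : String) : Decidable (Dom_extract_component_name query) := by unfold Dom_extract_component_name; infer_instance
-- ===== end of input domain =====

-- B merges A's two sequential scans into one stateful pass that remembers the first
-- uppercase candidate while scanning for a trigger match (objective: alternative decomposition).

-- shared primitive: Python str.isupper() (exact on ASCII: at least one cased char, no lowercase)
def pvStrIsupper (s : String) : Bool :=
  s.toList.any PySem.Chars.isupper && s.toList.all (fun c => !PySem.Chars.islower c)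

def pvTriggers : List String := ["analyze", "trace", "lifecycle", "lineage", "impact", "of", "for"]

-- ===== PORT A =====
-- first scan: enumerate(words), return stripped next word when a trigger fires and it is long enough
def pvLoopA1 (words : List String) : List (Int × String) → Option String
  | [] => none
  | (i, word) :: rest =>
    if pvTriggers.contains (PySem.Str.lower word) && decide (i + 1 < (words.length : Int)) then
      let pc := PySem.Str.stripChars (PySem.List.pyGetD words (i + 1) "") ".,!?"
      if decide (2 < PySem.Str.len pc) then some pc else pvLoopA1 words rest
    else pvLoopA1 words rest

-- second scan: first all-uppercase word of length > 2
def pvLoopA2 : List String → Option String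
  | [] => none
  | w :: rest => if pvStrIsupper w && decide (2 < PySem.Str.len w) then some w else pvLoopA2 rest

def extract_component_name (query : String) : String :=
  let words := PySem.Str.split₀ query
  match pvLoopA1 words (PySem.List.enumerate words) with
  | some r => r
  | none =>
    match pvLoopA2 words with
    | some r => r
    | none => ""

-- ===== PORT B =====
-- candidate update: store the word only if no candidate is held yet
def pvUpd (cand : Option String) (w : String) : Option String :=
  match cand with
  | some c => some c
  | none => if pvStrIsupper w && decide (2 < PySem.Str.len w) then some w else none

-- single pass: trigger test with early return, then candidate update, then recurse
def pvLoopB (words : List String) : List (Int × String) → Option String → String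
  | [], cand => cand.getD ""
  | (i, word) :: rest, cand =>
    if pvTriggers.contains (PySem.Str.lower word) && decide (i + 1 < (words.length : Int)) then
      let pc := PySem.Str.stripChars (PySem.List.pyGetD words (i + 1) "") ".,!?"
      if decide (2 < PySem.Str.len pc) then pc else pvLoopB words rest (pvUpd cand word)
    else pvLoopB words rest (pvUpd cand word)

def extract_component_name_alt (query : String) : String :=
  let words := PySem.Str.split₀ query
  pvLoopB words (PySem.List.enumerate words) none

-- ===== PRECONDITION & SPEC =====
def Spec_extract_component_name (query : String) (out : String) : Prop := out = extract_component_name_alt query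
instance (query : String) (out : String) : Decidable (Spec_extract_component_name query out) := by unfold Spec_extract_component_name; infer_instance

-- ===== CLAIM (what is proved, stated in full; the proofs are below) =====
def Claim_equal_extract_component_name : Prop := ∀ (query : String), Dom_extract_component_name query → Spec_extract_component_name query (extract_component_name query)

-- ===== LEMMAS AND PROOFS =====

-- the merged single pass equals the two sequential scans, for any held candidate
theorem pvLoopB_eq (words : List String) (l : List (Int × String)) (cand : Option String) :
    pvLoopB words l cand =
      match pvLoopA1 words l with
      | some r => r
      | none =>
        match cand with
        | some c => c
        | none =>
          match pvLoopA2 (l.map Prod.snd) with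
          | some r => r
          | none => "" := by
  induction l generalizing cand with
  | nil => cases cand <;> simp [pvLoopB, pvLoopA1, pvLoopA2]
  | cons p rest ih =>
    obtain ⟨i, word⟩ := p
    simp only [pvLoopB, pvLoopA1, pvLoopA2, pvUpd, List.map_cons]
    split_ifs with h1 h2 h3 <;>
      first
        | rfl
        | (rw [ih]; cases cand <;> simp_all)

-- ===== VERDICT (by name: the statement is the Claim_ definition above) =====
theorem extract_component_name_spec : Claim_equal_extract_component_name := by
  intro query _
  unfold Spec_extract_component_name extract_component_name extract_component_name_alt
  rw [pvLoopB_eq, PySem.List.map_snd_enumerate]
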